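-- pv_equiv track=rewrite | github.com/Mohan-Zhang-u/mzutils | mzutils/string_funcs.py | add_spaces_between_special_characters
-- ===== SOURCE A (Python) =====
-- def add_spaces_between_special_characters(InputText):
--     """
--     :param InputText:
--     :return:
--     """
--     regular = "1234567890qwertyuiopasdfghjklzxcvbnmQWERTYUIOPASDFGHJKLZXCVBNM "
--     b = set(list(InputText))
--     spec = []
--     for i in b:
--         if i not in regular:
--             spec.append(i)
--     for i in spec:
--         InputText = InputText.replace(i, ' ' + i + ' ')
--     return InputText
-- ===== SOURCE B (Python) =====
-- def add_spaces_between_special_characters(InputText):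
--     regular = "1234567890qwertyuiopasdfghjklzxcvbnmQWERTYUIOPASDFGHJKLZXCVBNM "
--     return ''.join(c if c in regular else ' ' + c + ' ' for c in InputText)
-- ===== Notes on version B (the rewrite author's own statement) =====
-- stated objective: simpler
-- what changed: A collects the distinct special characters of the text and runs one full str.replace pass per special character; B is a single character-wise scan that emits each special character surrounded by spaces and every other character unchanged.
import Mathlib
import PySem

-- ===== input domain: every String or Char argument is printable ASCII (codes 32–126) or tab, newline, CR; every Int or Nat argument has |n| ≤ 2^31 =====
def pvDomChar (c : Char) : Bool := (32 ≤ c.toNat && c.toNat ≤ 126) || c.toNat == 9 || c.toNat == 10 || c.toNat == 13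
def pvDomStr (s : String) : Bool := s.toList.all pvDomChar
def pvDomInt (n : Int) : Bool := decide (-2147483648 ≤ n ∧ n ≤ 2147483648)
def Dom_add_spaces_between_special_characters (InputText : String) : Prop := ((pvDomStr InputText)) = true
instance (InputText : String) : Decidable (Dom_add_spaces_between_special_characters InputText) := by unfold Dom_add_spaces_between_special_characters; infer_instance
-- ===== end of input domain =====

-- B replaces A's collect-special-chars-then-repeated-str.replace passes by one
-- character-wise scan emitting each special character surrounded by spaces (objective: simpler).

-- the shared constant string of "regular" characters (identical literal in both Pythons)
def pvRegular : String := "1234567890qwertyuiopasdfghjklzxcvbnmQWERTYUIOPASDFGHJKLZXCVBNM "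

-- ===== PORT A =====
def add_spaces_between_special_characters (InputText : String) : String :=
  let b : PySem.Set Char := PySem.Set.ofList InputText.toList
  let spec : List Char :=
    b.foldl (fun acc i => if !(PySem.Chars.isIn [i] pvRegular.toList) then acc ++ [i] else acc) []
  spec.foldl (fun t i => PySem.Str.replace t (String.ofList [i]) (String.ofList [' ', i, ' '])) InputText

-- ===== PORT B =====
def add_spaces_between_special_characters_alt (InputText : String) : String :=
  String.ofList (InputText.toList.flatMap
    (fun c => if PySem.Chars.isIn [c] pvRegular.toList then [c] else [' ', c, ' ']))

-- ===== PRECONDITION & SPEC =====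
def Spec_add_spaces_between_special_characters (InputText : String) (out : String) : Prop := out = add_spaces_between_special_characters_alt InputText
instance (InputText : String) (out : String) : Decidable (Spec_add_spaces_between_special_characters InputText out) := by unfold Spec_add_spaces_between_special_characters; infer_instance

-- ===== CLAIM (what is proved, stated in full; the proofs are below) =====
def Claim_equal_add_spaces_between_special_characters : Prop := ∀ (InputText : String), Dom_add_spaces_between_special_characters InputText → Spec_add_spaces_between_special_characters InputText (add_spaces_between_special_characters InputText)

-- ===== LEMMAS AND PROOFS =====

-- one str.replace pass with a single-char pattern, as a character-wise flatMap
def pvRep (c : Char) (l : List Char) : List Char :=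
  l.flatMap (fun x => if x = c then [' ', c, ' '] else [x])

theorem pv_go_single (i : Char) (new : List Char) :
    ∀ fuel (s acc : List Char), s.length ≤ fuel →
      PySem.Chars.replace.go [i] new fuel s acc
        = acc.reverse ++ s.flatMap (fun x => if x = i then new else [x]) := by
  intro fuel
  induction fuel with
  | zero =>
    intro s acc h
    have : s = [] := List.eq_nil_of_length_eq_zero (Nat.le_zero.mp h)
    subst this
    simp [PySem.Chars.replace.go]
  | succ fuel ih =>
    intro s acc h
    cases s with
    | nil => simp [PySem.Chars.replace.go]
    | cons c t =>
      by_cases hc : c = i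
      · subst hc
        have hpre : List.isPrefixOf [c] (c :: t) = true := by
          simp [List.isPrefixOf]
        rw [PySem.Chars.replace.go]
        simp only [hpre, if_true]
        rw [ih _ _ (by simpa using Nat.lt_succ_iff.mp (Nat.lt_of_lt_of_le (Nat.lt_succ_self _) (by simpa using h)))]
        simp
      · have hpre : List.isPrefixOf [i] (c :: t) = false := by
          simp [List.isPrefixOf]
          exact fun h' => absurd h'.symm hc
        rw [PySem.Chars.replace.go]
        simp only [hpre]
        rw [ih t (c :: acc) (by simpa using Nat.succ_le_succ_iff.mp h)]
        simp [hc]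

theorem pv_replace_single (i : Char) (new l : List Char) :
    PySem.Chars.replace l [i] new = l.flatMap (fun x => if x = i then new else [x]) := by
  rw [PySem.Chars.replace]
  simp only [List.isEmpty]
  exact pv_go_single i new l.length l [] (Nat.le_refl _)

theorem pv_fold_rep (S : List Char) :
    ∀ l : List Char, S.Nodup → ' ' ∉ S →
      S.foldl (fun t i => pvRep i t) l
        = l.flatMap (fun x => if x ∈ S then [' ', x, ' '] else [x]) := by
  induction S with
  | nil => intro l _ _; simp
  | cons c S' ih =>
    intro l hnd hsp
    have hcS' : c ∉ S' := (List.nodup_cons.mp hnd).1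
    have hndS' : S'.Nodup := (List.nodup_cons.mp hnd).2
    have hspS' : ' ' ∉ S' := fun h => hsp (List.mem_cons_of_mem _ h)
    have hspc : ' ' ≠ c := fun h => hsp (h ▸ List.mem_cons_self)
    simp only [List.foldl_cons]
    rw [ih (pvRep c l) hndS' hspS']
    unfold pvRep
    rw [List.flatMap_assoc]
    apply List.flatMap_congr
    intro x _
    by_cases hx : x = c
    · subst hx
      simp [hspS', hcS']
    · simp only [if_neg hx, List.flatMap_cons, List.flatMap_nil, List.append_nil]
      by_cases hx' : x ∈ S'
      · simp [hx', List.mem_cons, hx]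
      · simp [hx', List.mem_cons, hx]

theorem pv_fold_str (S : List Char) :
    ∀ t : String,
      (S.foldl (fun t i => PySem.Str.replace t (String.ofList [i]) (String.ofList [' ', i, ' '])) t).toList
        = S.foldl (fun l i => pvRep i l) t.toList := by
  induction S with
  | nil => intro t; rfl
  | cons c S' ih =>
    intro t
    simp only [List.foldl_cons]
    rw [ih]
    congr 1
    rw [PySem.Str.toList_replace]
    simp only [String.toList_ofList]
    exact pv_replace_single c [' ', c, ' '] t.toList

theorem pv_space_mem_regular : ' ' ∈ pvRegular.toList := by decide

-- ===== VERDICT (by name: the statement is the Claim_ definition above) =====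
theorem add_spaces_between_special_characters_spec : Claim_equal_add_spaces_between_special_characters := by
  intro InputText _
  unfold Spec_add_spaces_between_special_characters
  unfold add_spaces_between_special_characters add_spaces_between_special_characters_alt
  apply String.toList_inj.mp
  simp only [String.toList_ofList]
  set l := InputText.toList with hl
  rw [PySem.List.foldl_append_if (fun i => !(PySem.Chars.isIn [i] pvRegular.toList)) (fun i => i)]
  set S := ((PySem.Set.ofList l).filter (fun i => !(PySem.Chars.isIn [i] pvRegular.toList))).map (fun i => i) with hS
  have hSfilter : S = (PySem.Set.ofList l).filter (fun i => !(PySem.Chars.isIn [i] pvRegular.toList)) := by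
    simpa using hS
  have hmemS : ∀ x, x ∈ S ↔ (x ∈ PySem.Set.ofList l ∧ PySem.Chars.isIn [x] pvRegular.toList = false) := by
    intro x; rw [hSfilter, List.mem_filter]; simp
  have hnd : S.Nodup := by
    rw [hSfilter]; exact (PySem.Set.nodup_ofList l).filter _
  have hsp : ' ' ∉ S := by
    intro h
    have := ((hmemS ' ').mp h).2
    rw [PySem.Chars.isIn_eq_false_iff] at this
    exact this ((List.singleton_infix_iff _ _).mpr pv_space_mem_regular)
  rw [List.nil_append, pv_fold_str S InputText, ← hl, pv_fold_rep S l hnd hsp]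
  apply List.flatMap_congr
  intro x hx
  by_cases hreg : PySem.Chars.isIn [x] pvRegular.toList = true
  · have hn : x ∉ S := fun h => absurd ((hmemS x).mp h).2 (by simp [hreg])
    simp [hn, hreg]
  · have hx' : x ∈ S := (hmemS x).mpr ⟨(PySem.Set.mem_ofList l x).mpr hx, by simpa using hreg⟩
    simp [hx', Bool.of_not_eq_true hreg]
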